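-- pv_equiv track=rewrite | github.com/anthonykish/EECE590X | libs/fsm/fsm_timing_from_state_table.py | _fallback_to_dotted
-- ===== SOURCE A (Python) =====
-- def _fallback_to_dotted(dotless: str) -> str:
--     dotted = ""
--     last = ""
--     for ch in dotless:
--         if ch == last:
--             dotted += "."
--         else:
--             dotted += ch
--             last = ch
--     return dotted
-- ===== SOURCE B (Python) =====
-- from itertools import groupby
--
-- def _fallback_to_dotted(dotless: str) -> str:
--     return "".join(ch + "." * (len(list(grp)) - 1) for ch, grp in groupby(dotless))
-- ===== Notes on version B (the rewrite author's own statement) =====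
-- stated objective: simpler
-- what changed: Replaces the per-character scan with a last-seen-character accumulator by an itertools.groupby pass over maximal runs, emitting each run's character followed by dots for the rest of the run.
import Mathlib
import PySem

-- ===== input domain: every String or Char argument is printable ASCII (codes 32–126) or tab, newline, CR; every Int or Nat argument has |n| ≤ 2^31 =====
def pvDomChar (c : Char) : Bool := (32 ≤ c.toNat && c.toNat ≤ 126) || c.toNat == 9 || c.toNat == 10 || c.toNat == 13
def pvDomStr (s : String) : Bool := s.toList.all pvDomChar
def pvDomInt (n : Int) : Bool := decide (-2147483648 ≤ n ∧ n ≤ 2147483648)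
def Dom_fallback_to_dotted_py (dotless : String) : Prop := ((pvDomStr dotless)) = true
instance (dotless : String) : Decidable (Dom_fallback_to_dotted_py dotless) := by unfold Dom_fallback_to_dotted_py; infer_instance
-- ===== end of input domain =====

-- B replaces A's per-character scan with a last-seen-character accumulator by a pass over maximal runs
-- (itertools.groupby), emitting each run's character followed by dots for the rest of the run.

-- ===== PORT A =====
-- Python's `last` starts as "" (never equal to any single char ch), then holds the last emitted
-- char; `Option Char` with `none` for "" is exact here since ch is always a single character.
def fallback_to_dotted_py (dotless : String) : String :=
  String.mk ((dotless.toList.foldl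
    (fun (st : List Char × Option Char) ch =>
      if some ch = st.2 then (st.1 ++ ['.'], st.2)
      else (st.1 ++ [ch], some ch))
    ([], none)).1)

-- ===== PORT B =====
-- groupby: split off the maximal run of the head character, emit head ++ dots, recurse on the rest.
def fallbackAltRuns : List Char → List Char
  | [] => []
  | c :: rest =>
    c :: (List.replicate (rest.takeWhile (· == c)).length '.'
          ++ fallbackAltRuns (rest.dropWhile (· == c)))
  termination_by l => l.length
  decreasing_by
    simp only [List.length_cons]
    exact Nat.lt_succ_of_le (List.length_dropWhile_le _ _)

def fallback_to_dotted_py_alt (dotless : String) : String :=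
  String.mk (fallbackAltRuns dotless.toList)

-- ===== PRECONDITION & SPEC =====
def Spec_fallback_to_dotted_py (dotless : String) (out : String) : Prop := out = fallback_to_dotted_py_alt dotless
instance (dotless : String) (out : String) : Decidable (Spec_fallback_to_dotted_py dotless out) := by unfold Spec_fallback_to_dotted_py; infer_instance

-- ===== CLAIM (what is proved, stated in full; the proofs are below) =====
def Claim_equal_fallback_to_dotted_py : Prop := ∀ (dotless : String), Dom_fallback_to_dotted_py dotless → Spec_fallback_to_dotted_py dotless (fallback_to_dotted_py dotless)

-- ===== LEMMAS AND PROOFS =====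

-- A's loop step, named for the lemmas.
def fbStep (st : List Char × Option Char) (ch : Char) : List Char × Option Char :=
  if some ch = st.2 then (st.1 ++ ['.'], st.2) else (st.1 ++ [ch], some ch)

-- The accumulator only grows by appending; it factors out of the fold.
theorem fb_foldl_acc (l : List Char) (acc : List Char) (last : Option Char) :
    (l.foldl fbStep (acc, last)).1 = acc ++ (l.foldl fbStep ([], last)).1 := by
  induction l generalizing acc last with
  | nil => simp
  | cons x rest ih =>
    simp only [List.foldl_cons]
    by_cases h : some x = last
    · simp only [fbStep, h, if_true, List.nil_append]
      rw [ih (acc ++ ['.']) last, ih ['.'] last, List.append_assoc]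
    · simp only [fbStep, if_neg h, List.nil_append]
      rw [ih (acc ++ [x]) (some x), ih [x] (some x), List.append_assoc]

-- Running A's loop with last = some c emits dots for the maximal run of c, then behaves as B.
theorem fb_foldl_some (l : List Char) (c : Char) :
    (l.foldl fbStep ([], some c)).1 =
      List.replicate (l.takeWhile (· == c)).length '.'
        ++ fallbackAltRuns (l.dropWhile (· == c)) := by
  induction l generalizing c with
  | nil => simp [fallbackAltRuns]
  | cons x rest ih =>
    by_cases h : x = c
    · subst h
      simp only [List.foldl_cons, fbStep, if_true, List.nil_append]
      rw [fb_foldl_acc, ih x]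
      simp [List.takeWhile, List.dropWhile, List.replicate_succ]
    · have hne : some x ≠ some c := by simpa using h
      simp only [List.foldl_cons, fbStep, if_neg hne]
      rw [fb_foldl_acc, ih x]
      have hb : (x == c) = false := by simpa using h
      simp [List.takeWhile, List.dropWhile, hb, fallbackAltRuns]

theorem fb_foldl_none (l : List Char) :
    (l.foldl fbStep ([], none)).1 = fallbackAltRuns l := by
  cases l with
  | nil => simp [fallbackAltRuns]
  | cons x rest =>
    simp only [List.foldl_cons, fbStep, reduceCtorEq, if_false, List.nil_append]
    rw [fb_foldl_acc, fb_foldl_some]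
    simp [fallbackAltRuns]

-- ===== VERDICT (by name: the statement is the Claim_ definition above) =====
theorem fallback_to_dotted_py_spec : Claim_equal_fallback_to_dotted_py := by
  intro dotless _
  show fallback_to_dotted_py dotless = fallback_to_dotted_py_alt dotless
  unfold fallback_to_dotted_py fallback_to_dotted_py_alt
  have : (fun (st : List Char × Option Char) ch =>
      if some ch = st.2 then (st.1 ++ ['.'], st.2) else (st.1 ++ [ch], some ch)) = fbStep := rfl
  rw [this, fb_foldl_none]
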